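-- pv_equiv track=rewrite | github.com/razvan404/ubb-projects | 1st Semester/Computational Logic/Electronic Project/BaseCalculator/Domain/Number.py | listToNumber
-- ===== SOURCE A (Python) =====
-- def listToNumber(x):
--     '''
--     Transformă un număr sub forma unei liste
--     într-un număr sub forma unui string
--     :param x: list
--     :return: string
--     '''
--     y = ""
--     for i in x:
--         if i == 10:
--             i = "A"
--         elif i == 11:
--             i = "B"
--         elif i == 12:
--             i = "C"
--         elif i == 13:
--             i = "D"
--         elif i == 14:
--             i = "E"
--         elif i == 15:
--             i = "F"
--         if i != 0 or y != "":
--             y += str(i)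
--     if y == "":
--         y = "0"
--     return y
-- ===== SOURCE B (Python) =====
-- _DIGITS = {10: 'A', 11: 'B', 12: 'C', 13: 'D', 14: 'E', 15: 'F'}
--
--
-- def listToNumber(x):
--     # Phase 1: locate the first digit that is not 0.
--     start = 0
--     while start < len(x) and x[start] == 0:
--         start += 1
--     tail = x[start:]
--     if not tail:
--         return "0"
--     # Phase 2: render the remaining digits.
--     return "".join(_DIGITS.get(d, str(d)) for d in tail)
-- ===== Notes on version B (the rewrite author's own statement) =====
-- stated objective: simpler
-- what changed: Replaces A's single pass with an implicit 'y is still empty' flag and per-digit if/elif chain by a two-phase decomposition: a pre-scan that skips leading zero digits, then a dict-lookup map-and-join over the remaining suffix.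
import Mathlib
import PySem

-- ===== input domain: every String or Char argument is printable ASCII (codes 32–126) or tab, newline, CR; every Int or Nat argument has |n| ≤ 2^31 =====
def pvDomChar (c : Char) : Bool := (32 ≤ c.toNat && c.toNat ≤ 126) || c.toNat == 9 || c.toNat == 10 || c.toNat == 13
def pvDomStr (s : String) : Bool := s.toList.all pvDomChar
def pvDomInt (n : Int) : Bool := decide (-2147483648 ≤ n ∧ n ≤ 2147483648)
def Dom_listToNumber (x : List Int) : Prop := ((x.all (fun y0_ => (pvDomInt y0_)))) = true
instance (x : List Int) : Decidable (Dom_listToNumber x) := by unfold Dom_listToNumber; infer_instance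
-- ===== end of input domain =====

-- B replaces A's single pass with an inline 'output still empty' flag by a two-phase
-- decomposition (skip leading zeros, then map-and-join the suffix); objective: simpler.


-- ===== PORT A =====
-- the if/elif remapping of a single digit (str(i) for a plain digit)
def pvMapA (i : Int) : String :=
  if i = 10 then "A" else if i = 11 then "B" else if i = 12 then "C"
  else if i = 13 then "D" else if i = 14 then "E" else if i = 15 then "F"
  else PySem.Int.toStr i

-- one loop body; Python's `i != 0` tests the REMAPPED value: a letter string is never == 0
def pvStepA (y : String) (i : Int) : String :=
  if (10 ≤ i ∧ i ≤ 15) ∨ i ≠ 0 ∨ y ≠ "" then y ++ pvMapA i else y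

def listToNumber (x : List Int) : String :=
  let y := x.foldl pvStepA ""
  if y = "" then "0" else y

-- ===== PORT B =====
def pvDigits : PySem.Dict Int String :=
  PySem.Dict.ofList [(10, "A"), (11, "B"), (12, "C"), (13, "D"), (14, "E"), (15, "F")]

-- the pre-scan: `while start < len(x) and x[start] == 0: start += 1` followed by `x[start:]`
def pvSkipZeros : List Int → List Int
  | [] => []
  | d :: rest => if d = 0 then pvSkipZeros rest else d :: rest

def listToNumber_alt (x : List Int) : String :=
  let tail := pvSkipZeros x
  if tail.isEmpty then "0"
  else PySem.Str.join "" (tail.map (fun d => PySem.Dict.getD pvDigits d (PySem.Int.toStr d)))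

-- ===== PRECONDITION & SPEC =====
def Spec_listToNumber (x : List Int) (out : String) : Prop := out = listToNumber_alt x
instance (x : List Int) (out : String) : Decidable (Spec_listToNumber x out) := by unfold Spec_listToNumber; infer_instance

-- ===== CLAIM (what is proved, stated in full; the proofs are below) =====
def Claim_equal_listToNumber : Prop := ∀ (x : List Int), Dom_listToNumber x → Spec_listToNumber x (listToNumber x)

-- ===== LEMMAS AND PROOFS =====

lemma pvToDigitsCore_acc (b : Nat) : ∀ (f n : Nat) (l : List Char),
    Nat.toDigitsCore b f n l = [] → l = [] := by
  intro f
  induction f with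
  | zero => intro n l h; simpa [Nat.toDigitsCore] using h
  | succ f ih =>
      intro n l h
      simp only [Nat.toDigitsCore] at h
      by_cases hd : n / b = 0
      · simp [hd] at h
      · rw [if_neg hd] at h
        have := ih (n / b) _ h
        exact absurd this (by simp)

lemma pvToDigitsCore_ne (b f n : Nat) (l : List Char) :
    Nat.toDigitsCore b (f + 1) n l ≠ [] := by
  intro h
  simp only [Nat.toDigitsCore] at h
  by_cases hd : n / b = 0
  · simp [hd] at h
  · rw [if_neg hd] at h
    exact absurd (pvToDigitsCore_acc b f (n / b) _ h) (by simp)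

lemma pvToChars_ne_nil (n : Int) : PySem.Int.toChars n ≠ [] := by
  unfold PySem.Int.toChars
  by_cases hn : n < 0
  · simp [hn]
  · rw [if_neg hn]
    unfold Nat.toDigits
    exact pvToDigitsCore_ne 10 n.toNat n.toNat []

lemma pvMapA_toList_ne (i : Int) : (pvMapA i).toList ≠ [] := by
  unfold pvMapA
  split_ifs <;> simp [PySem.Int.toList_toStr, pvToChars_ne_nil]

lemma pvMapA_eq_getD (i : Int) :
    pvMapA i = PySem.Dict.getD pvDigits i (PySem.Int.toStr i) := by
  have hmk : pvDigits
      = PySem.Dict.mk [(10, "A"), (11, "B"), (12, "C"), (13, "D"), (14, "E"), (15, "F")] := by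
    rfl
  unfold pvMapA
  split_ifs with h1 h2 h3 h4 h5 h6
  · subst h1; rfl
  · subst h2; rfl
  · subst h3; rfl
  · subst h4; rfl
  · subst h5; rfl
  · subst h6; rfl
  · rw [hmk]
    simp only [PySem.Dict.getD, PySem.Dict.get?_mk_cons, beq_iff_eq]
    rw [if_neg (fun h => h1 h.symm), if_neg (fun h => h2 h.symm), if_neg (fun h => h3 h.symm),
        if_neg (fun h => h4 h.symm), if_neg (fun h => h5 h.symm), if_neg (fun h => h6 h.symm)]
    simp [PySem.Dict.get?]

lemma pvJoin_nil_cons (p : List Char) (rest : List (List Char)) :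
    PySem.Chars.join [] (p :: rest) = p ++ PySem.Chars.join [] rest := by
  cases rest with
  | nil => simp [PySem.Chars.join, List.intercalate]
  | cons q r => rw [PySem.Chars.join_cons_cons]; simp

lemma pvStepA_ne (y : String) (i : Int) (h : y ≠ "") : pvStepA y i = y ++ pvMapA i := by
  unfold pvStepA
  rw [if_pos (Or.inr (Or.inr h))]

lemma pvFoldl_ne (xs : List Int) : ∀ (y : String), y ≠ "" →
    (xs.foldl pvStepA y).toList
      = y.toList ++ PySem.Chars.join [] ((xs.map pvMapA).map String.toList) := by
  induction xs with
  | nil => intro y _; simp [PySem.Chars.join_nil]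
  | cons i rest ih =>
      intro y hy
      have hne : (y ++ pvMapA i) ≠ "" := by
        intro h
        apply hy
        rw [← String.toList_inj] at h ⊢
        simp only [String.toList_append] at h
        simpa using (List.append_eq_nil_iff.mp h).1
      simp only [List.foldl_cons, pvStepA_ne y i hy, ih _ hne, List.map_cons]
      rw [pvJoin_nil_cons, String.toList_append]
      simp

lemma pvMain (x : List Int) : listToNumber x = listToNumber_alt x := by
  induction x with
  | nil => rfl
  | cons i rest ih =>
      by_cases hi : i = 0
      · subst hi
        have hA : listToNumber (0 :: rest) = listToNumber rest := by
          unfold listToNumber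
          simp [pvStepA]
        have hB : listToNumber_alt (0 :: rest) = listToNumber_alt rest := by
          unfold listToNumber_alt
          simp [pvSkipZeros]
        rw [hA, hB, ih]
      · -- first non-zero digit reached: both sides render pvMapA over i :: rest
        have hstep : pvStepA "" i = "" ++ pvMapA i := by
          unfold pvStepA
          rw [if_pos (Or.inr (Or.inl hi))]
        have hne : ("" ++ pvMapA i : String) ≠ "" := by
          intro h
          rw [← String.toList_inj] at h
          simp only [String.toList_append] at h
          exact pvMapA_toList_ne i (by simpa using h)
        have hfold : ((i :: rest).foldl pvStepA "").toList
            = PySem.Chars.join [] (((i :: rest).map pvMapA).map String.toList) := by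
          simp only [List.foldl_cons, hstep, pvFoldl_ne rest _ hne, List.map_cons]
          rw [pvJoin_nil_cons, String.toList_append]
          simp
        have hfold_ne : (i :: rest).foldl pvStepA "" ≠ "" := by
          intro h
          rw [← String.toList_inj, hfold] at h
          simp only [List.map_cons, pvJoin_nil_cons, String.toList_empty,
            List.append_eq_nil_iff] at h
          exact pvMapA_toList_ne i h.1
        have hskip : pvSkipZeros (i :: rest) = i :: rest := by
          simp [pvSkipZeros, hi]
        have hm : (i :: rest).map pvMapA
            = (i :: rest).map (fun d => PySem.Dict.getD pvDigits d (PySem.Int.toStr d)) :=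
          List.map_congr_left (fun d _ => pvMapA_eq_getD d)
        unfold listToNumber listToNumber_alt
        rw [hskip]
        simp only [List.isEmpty_cons, Bool.false_eq_true, if_false, if_neg hfold_ne]
        rw [← String.toList_inj, hfold, hm, PySem.Str.toList_join, String.toList_empty]

-- ===== VERDICT (by name: the statement is the Claim_ definition above) =====
theorem listToNumber_spec : Claim_equal_listToNumber := by
  intro x _
  unfold Spec_listToNumber
  exact pvMain x
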